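-- pv_equiv track=rewrite | github.com/paramita1024/Changepoint-TPP | common/Utils_backup.py | GetCPVectorized
-- ===== SOURCE A (Python) =====
-- def GetCPVectorized( list_of_change_points, LLRatio, cp_times=None):
--     if cp_times is None:
--         cp_times = [x[3] for x in LLRatio if x[2]>0]
--     cp_indicator, i=[],0
--     for t in cp_times:
--         if i < len(list_of_change_points):
--             if t>=list_of_change_points[i]:
--                 cp_indicator += [1]
--                 i += 1
--             else:
--                 cp_indicator += [0]
--         else:
--             cp_indicator += [0]
--     return cp_indicator
-- ===== SOURCE B (Python) =====
-- def GetCPVectorized(list_of_change_points, LLRatio, cp_times=None):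
--     if cp_times is None:
--         cp_times = [x[3] for x in LLRatio if x[2] > 0]
--     out = []
--     j = 0
--     for cp in list_of_change_points:
--         k = j
--         while k < len(cp_times) and cp_times[k] < cp:
--             k += 1
--         if k < len(cp_times):
--             out.extend([0] * (k - j))
--             out.append(1)
--             j = k + 1
--         else:
--             break
--     out.extend([0] * (len(cp_times) - j))
--     return out
-- ===== Notes on version B (the rewrite author's own statement) =====
-- stated objective: alternative
-- what changed: B loops over change points as the outer sequence, advancing a single monotone pointer through cp_times and emitting each zero-run plus a 1 as a block (with one trailing zero fill), instead of A's per-time loop that tests the current change point on every time step.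
import Mathlib
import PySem

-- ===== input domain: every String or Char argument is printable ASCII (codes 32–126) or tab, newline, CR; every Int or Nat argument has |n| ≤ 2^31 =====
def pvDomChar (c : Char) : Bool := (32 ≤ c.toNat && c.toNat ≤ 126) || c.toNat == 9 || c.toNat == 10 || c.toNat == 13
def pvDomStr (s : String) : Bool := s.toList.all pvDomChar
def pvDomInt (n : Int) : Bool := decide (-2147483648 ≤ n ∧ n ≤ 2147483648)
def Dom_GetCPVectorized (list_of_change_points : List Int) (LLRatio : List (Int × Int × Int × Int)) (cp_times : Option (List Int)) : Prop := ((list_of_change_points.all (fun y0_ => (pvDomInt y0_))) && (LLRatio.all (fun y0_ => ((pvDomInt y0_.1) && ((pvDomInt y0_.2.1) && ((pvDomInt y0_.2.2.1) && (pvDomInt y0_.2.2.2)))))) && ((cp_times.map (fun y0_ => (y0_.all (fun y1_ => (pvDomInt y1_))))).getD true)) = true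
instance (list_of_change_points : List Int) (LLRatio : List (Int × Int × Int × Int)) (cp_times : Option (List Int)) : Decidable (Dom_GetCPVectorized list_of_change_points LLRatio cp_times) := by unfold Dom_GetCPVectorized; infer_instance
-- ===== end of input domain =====

-- B loops over the change points (outer), advancing one monotone pointer through cp_times and
-- emitting zero-runs plus 1s as blocks, instead of A's per-time loop; same values everywhere.

-- ===== PORT A =====
-- fold over cp_times with state (cp_indicator, i), as in A
def GetCPVectorized (list_of_change_points : List Int) (LLRatio : List (Int × Int × Int × Int)) (cp_times : Option (List Int)) : List Int :=
  let times : List Int :=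
    match cp_times with
    | some ts => ts
    | none => (LLRatio.filter (fun x => x.2.2.1 > 0)).map (fun x => x.2.2.2)
  (times.foldl (fun (st : List Int × Nat) t =>
      if st.2 < list_of_change_points.length then
        if list_of_change_points.getD st.2 0 ≤ t then (st.1 ++ [1], st.2 + 1)
        else (st.1 ++ [0], st.2)
      else (st.1 ++ [0], st.2)) ([], 0)).1

-- ===== PORT B =====
-- the inner `while k < len(cp_times) and cp_times[k] < cp: k += 1` of Source B
def pvAdvance (times : List Int) (cp : Int) (k : Nat) : Nat :=
  if k < times.length ∧ times.getD k 0 < cp then pvAdvance times cp (k + 1) else k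
termination_by times.length - k
decreasing_by omega

-- the outer `for cp in list_of_change_points` loop of Source B, with pointer j; the `break` branch
-- and the loop's normal exit both end with the trailing `out.extend([0]*(len(cp_times)-j))`
def pvBLoop (cps times : List Int) (j : Nat) : List Int :=
  match cps with
  | [] => List.replicate (times.length - j) 0
  | cp :: rest =>
    let k := pvAdvance times cp j
    if k < times.length then
      List.replicate (k - j) 0 ++ [1] ++ pvBLoop rest times (k + 1)
    else
      List.replicate (times.length - j) 0

def GetCPVectorized_alt (list_of_change_points : List Int) (LLRatio : List (Int × Int × Int × Int)) (cp_times : Option (List Int)) : List Int :=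
  let times : List Int :=
    match cp_times with
    | some ts => ts
    | none => (LLRatio.filter (fun x => x.2.2.1 > 0)).map (fun x => x.2.2.2)
  pvBLoop list_of_change_points times 0

-- ===== PRECONDITION & SPEC =====
def Spec_GetCPVectorized (list_of_change_points : List Int) (LLRatio : List (Int × Int × Int × Int)) (cp_times : Option (List Int)) (out : List Int) : Prop := out = GetCPVectorized_alt list_of_change_points LLRatio cp_times
instance (list_of_change_points : List Int) (LLRatio : List (Int × Int × Int × Int)) (cp_times : Option (List Int)) (out : List Int) : Decidable (Spec_GetCPVectorized list_of_change_points LLRatio cp_times out) := by unfold Spec_GetCPVectorized; infer_instance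

-- ===== CLAIM (what is proved, stated in full; the proofs are below) =====
def Claim_equal_GetCPVectorized : Prop := ∀ (list_of_change_points : List Int) (LLRatio : List (Int × Int × Int × Int)) (cp_times : Option (List Int)), Dom_GetCPVectorized list_of_change_points LLRatio cp_times → Spec_GetCPVectorized list_of_change_points LLRatio cp_times (GetCPVectorized list_of_change_points LLRatio cp_times)

-- ===== LEMMAS AND PROOFS =====

-- reference structural version used only by the proofs: consume times one by one,
-- head change point matched when c ≤ t
def pvGo (cs ts : List Int) : List Int :=
  match cs, ts with
  | _, [] => []
  | [], _ :: ts' => 0 :: pvGo [] ts'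
  | c :: cs', t :: ts' => if c ≤ t then 1 :: pvGo cs' ts' else 0 :: pvGo (c :: cs') ts'

theorem pvGo_nil (ts : List Int) : pvGo [] ts = List.replicate ts.length 0 := by
  induction ts with
  | nil => rfl
  | cons t ts ih => simp [pvGo, ih, List.replicate_succ]

theorem pvA_loop (cps times : List Int) :
    ∀ (i : Nat) (acc : List Int),
      (times.foldl (fun (st : List Int × Nat) t =>
        if st.2 < cps.length then
          if cps.getD st.2 0 ≤ t then (st.1 ++ [1], st.2 + 1)
          else (st.1 ++ [0], st.2)
        else (st.1 ++ [0], st.2)) (acc, i)).1 = acc ++ pvGo (cps.drop i) times := by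
  induction times with
  | nil => intro i acc; simp [pvGo]
  | cons t ts ih =>
    intro i acc
    rw [List.foldl_cons]
    by_cases h : i < cps.length
    · have hd : cps.drop i = cps[i] :: cps.drop (i + 1) := List.drop_eq_getElem_cons h
      have hgd : cps.getD i 0 = cps[i] := List.getD_eq_getElem cps 0 h
      by_cases hle : cps[i] ≤ t
      · rw [show (if i < cps.length then
              if cps.getD i 0 ≤ t then (acc ++ [1], i + 1) else (acc ++ [0], i)
            else (acc ++ [0], i)) = (acc ++ [1], i + 1) by rw [if_pos h, hgd, if_pos hle]]
        rw [ih, hd]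
        simp [pvGo, hle]
      · rw [show (if i < cps.length then
              if cps.getD i 0 ≤ t then (acc ++ [1], i + 1) else (acc ++ [0], i)
            else (acc ++ [0], i)) = (acc ++ [0], i) by rw [if_pos h, hgd, if_neg hle]]
        rw [ih, hd]
        simp [pvGo, hle]
    · have hd : cps.drop i = [] := List.drop_eq_nil_of_le (by omega)
      rw [show (if i < cps.length then
            if cps.getD i 0 ≤ t then (acc ++ [1], i + 1) else (acc ++ [0], i)
          else (acc ++ [0], i)) = (acc ++ [0], i) by rw [if_neg h]]
      rw [ih, hd]
      simp [pvGo]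

theorem pvAdvance_ge (times : List Int) (cp : Int) (k : Nat) : k ≤ pvAdvance times cp k := by
  unfold pvAdvance
  split
  · have := pvAdvance_ge times cp (k + 1); omega
  · omega
termination_by times.length - k
decreasing_by
  rename_i h; omega

theorem pvAdvance_stop (times : List Int) (cp : Int) (k : Nat)
    (h : ¬ (k < times.length ∧ times.getD k 0 < cp)) : pvAdvance times cp k = k := by
  rw [pvAdvance, if_neg h]

theorem pvAdvance_step (times : List Int) (cp : Int) (k : Nat)
    (h : k < times.length ∧ times.getD k 0 < cp) :
    pvAdvance times cp k = pvAdvance times cp (k + 1) := by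
  rw [pvAdvance, if_pos h]

theorem pvBLoop_cons (cp : Int) (rest times : List Int)
    (IH : ∀ j, pvBLoop rest times j = pvGo rest (times.drop j)) :
    ∀ n j, times.length - j ≤ n → pvBLoop (cp :: rest) times j = pvGo (cp :: rest) (times.drop j) := by
  intro n
  induction n with
  | zero =>
    intro j hj
    have hlen : times.length ≤ j := by omega
    have hadv : pvAdvance times cp j = j := pvAdvance_stop _ _ _ (by omega)
    have hd : times.drop j = [] := List.drop_eq_nil_of_le hlen
    rw [hd]
    simp only [pvBLoop, hadv]
    rw [if_neg (by omega), show times.length - j = 0 by omega]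
    rfl
  | succ n ihn =>
    intro j hj
    by_cases h : j < times.length
    · have hd : times.drop j = times[j] :: times.drop (j + 1) := List.drop_eq_getElem_cons h
      have hgd : times.getD j 0 = times[j] := List.getD_eq_getElem times 0 h
      by_cases hlt : times[j] < cp
      · -- step the pointer: this time stays 0
        have hadv : pvAdvance times cp j = pvAdvance times cp (j + 1) :=
          pvAdvance_step _ _ _ ⟨h, by rw [hgd]; exact hlt⟩
        have hge : j + 1 ≤ pvAdvance times cp (j + 1) := pvAdvance_ge _ _ _
        have hrec := ihn (j + 1) (by omega)
        rw [hd]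
        have hne : ¬ cp ≤ times[j] := by omega
        simp only [pvGo, if_neg hne]
        rw [← hrec]
        simp only [pvBLoop, hadv]
        by_cases hk : pvAdvance times cp (j + 1) < times.length
      -- the zero-run at position j folds into the run computed from j+1
        · rw [if_pos hk, if_pos hk,
            show pvAdvance times cp (j + 1) - j = (pvAdvance times cp (j + 1) - (j + 1)) + 1 by omega]
          simp [List.replicate_succ]
        · rw [if_neg hk, if_neg hk,
            show times.length - j = (times.length - (j + 1)) + 1 by omega]
          simp [List.replicate_succ]
      · -- match: emit 1, move to the next change point
        have hadv : pvAdvance times cp j = j := pvAdvance_stop _ _ _ (by rw [hgd]; omega)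
        have hle : cp ≤ times[j] := by omega
        rw [hd]
        simp only [pvGo, if_pos hle]
        simp only [pvBLoop, hadv]
        rw [if_pos h, show j - j = 0 by omega, IH (j + 1)]
        rfl
    · have hadv : pvAdvance times cp j = j := pvAdvance_stop _ _ _ (by omega)
      have hd : times.drop j = [] := List.drop_eq_nil_of_le (by omega)
      rw [hd]
      simp only [pvBLoop, hadv]
      rw [if_neg h, show times.length - j = 0 by omega]
      rfl

theorem pvBLoop_eq (cps times : List Int) : ∀ j, pvBLoop cps times j = pvGo cps (times.drop j) := by
  induction cps with
  | nil =>
    intro j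
    simp [pvBLoop, pvGo_nil, List.length_drop]
  | cons cp rest ih =>
    intro j
    exact pvBLoop_cons cp rest times ih (times.length - j) j (le_refl _)

-- ===== VERDICT (by name: the statement is the Claim_ definition above) =====
theorem GetCPVectorized_spec : Claim_equal_GetCPVectorized := by
  intro cps llr ct _
  unfold Spec_GetCPVectorized GetCPVectorized GetCPVectorized_alt
  cases ct with
  | none => simp only [pvA_loop, pvBLoop_eq, List.drop_zero, List.nil_append]
  | some ts => simp only [pvA_loop, pvBLoop_eq, List.drop_zero, List.nil_append]
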